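-- pv_equiv track=rewrite | github.com/Yawson3393/DataInsightEngine_V1.0 | backend/core/pipeline/worker_process.py | _extract_rack_id
-- ===== SOURCE A (Python) =====
-- def _extract_rack_id(fname: str):
--     fname = fname.lower()
--     if "rack" not in fname:
--         return "unknown"
--     digits = ""
--     for c in fname[fname.index("rack") + 4:]:
--         if c.isdigit():
--             digits += c
--         else:
--             break
--     return f"rack{digits}"
-- ===== SOURCE B (Python) =====
-- def _extract_rack_id(fname: str):
--     low = fname.lower()
--     i = low.find("rack")
--     if i == -1:
--         return "unknown"
--     rest = low[i + 4:]
--     stripped = rest.lstrip("0123456789")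
--     return "rack" + rest[:len(rest) - len(stripped)]
-- ===== Notes on version B (the rewrite author's own statement) =====
-- stated objective: idiomatic
-- what changed: Replaces the membership test + index + explicit char-accumulating loop with a single find and an lstrip-based arithmetic slice to take the leading digit run.
import Mathlib
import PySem

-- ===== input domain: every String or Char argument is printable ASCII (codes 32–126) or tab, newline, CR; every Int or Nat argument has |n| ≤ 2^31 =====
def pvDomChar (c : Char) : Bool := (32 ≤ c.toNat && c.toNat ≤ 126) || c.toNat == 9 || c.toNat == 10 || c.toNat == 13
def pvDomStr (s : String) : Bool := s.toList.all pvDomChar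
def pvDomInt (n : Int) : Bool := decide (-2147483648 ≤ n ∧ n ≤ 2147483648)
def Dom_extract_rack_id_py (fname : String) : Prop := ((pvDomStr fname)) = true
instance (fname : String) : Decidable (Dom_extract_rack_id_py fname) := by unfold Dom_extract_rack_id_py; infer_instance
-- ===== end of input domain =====

-- B replaces A's membership test + index + char-accumulating break loop by one find and an
-- lstrip-based arithmetic slice of the leading digit run (idiomatic, same cost).

-- ===== PORT A =====
-- the 'for c in …: if c.isdigit(): digits += c else: break' loop, transliterated
def pvALoop : List Char → List Char → List Char
  | [], digits => digits
  | c :: cs, digits => if PySem.Chars.isdigit c then pvALoop cs (digits ++ [c]) else digits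

def extract_rack_id_py (fname : String) : String :=
  let f := PySem.Str.lower fname
  if PySem.Str.isIn "rack" f = false then "unknown"
  else
    -- fname.index("rack") cannot raise here ("rack" in fname holds), so it equals find
    let tail := PySem.Str.slice f (some (PySem.Str.find f "rack" + 4)) none
    String.ofList ("rack".toList ++ pvALoop tail.toList [])

-- ===== PORT B =====
def extract_rack_id_py_alt (fname : String) : String :=
  let low := PySem.Str.lower fname
  let i := PySem.Str.find low "rack"
  if i = -1 then "unknown"
  else
    let rest := (PySem.Str.slice low (some (i + 4)) none).toList
    -- rest.lstrip("0123456789"): drop the leading chars belonging to the set (exact for lstrip with a chars argument)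
    let stripped := rest.dropWhile (fun c => c ∈ ['0','1','2','3','4','5','6','7','8','9'])
    String.ofList ("rack".toList ++ rest.take (rest.length - stripped.length))

-- ===== PRECONDITION & SPEC =====
def Spec_extract_rack_id_py (fname : String) (out : String) : Prop := out = extract_rack_id_py_alt fname
instance (fname : String) (out : String) : Decidable (Spec_extract_rack_id_py fname out) := by unfold Spec_extract_rack_id_py; infer_instance

-- ===== CLAIM (what is proved, stated in full; the proofs are below) =====
def Claim_equal_extract_rack_id_py : Prop := ∀ (fname : String), Dom_extract_rack_id_py fname → Spec_extract_rack_id_py fname (extract_rack_id_py fname)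

-- ===== LEMMAS AND PROOFS =====

theorem pvALoop_eq_takeWhile (cs acc : List Char) :
    pvALoop cs acc = acc ++ cs.takeWhile PySem.Chars.isdigit := by
  induction cs generalizing acc with
  | nil => simp [pvALoop]
  | cons c cs ih =>
    by_cases h : PySem.Chars.isdigit c
    · simp [pvALoop, h, List.takeWhile, ih]
    · simp [pvALoop, h, List.takeWhile]

theorem pvIsdigit_eq_mem (c : Char) :
    PySem.Chars.isdigit c = decide (c ∈ ['0','1','2','3','4','5','6','7','8','9']) := by
  have h : ('0' ≤ c ∧ c ≤ '9') ↔ c ∈ ['0','1','2','3','4','5','6','7','8','9'] := by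
    simp only [List.mem_cons, List.not_mem_nil, or_false, Char.le_def, Char.ext_iff,
      UInt32.le_iff_toNat_le, ← UInt32.toNat_inj,
      show ('0').val.toNat = 48 from rfl, show ('1').val.toNat = 49 from rfl,
      show ('2').val.toNat = 50 from rfl, show ('3').val.toNat = 51 from rfl,
      show ('4').val.toNat = 52 from rfl, show ('5').val.toNat = 53 from rfl,
      show ('6').val.toNat = 54 from rfl, show ('7').val.toNat = 55 from rfl,
      show ('8').val.toNat = 56 from rfl, show ('9').val.toNat = 57 from rfl]
    omega
  simp [PySem.Chars.isdigit, ← h]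

theorem pvTake_sub_dropWhile {α : Type} (p : α → Bool) (l : List α) :
    l.take (l.length - (l.dropWhile p).length) = l.takeWhile p := by
  have hsplit := List.takeWhile_append_dropWhile (p := p) (l := l)
  have hlen : (l.takeWhile p).length + (l.dropWhile p).length = l.length := by
    rw [← List.length_append, hsplit]
  have hsub : l.length - (l.dropWhile p).length = (l.takeWhile p).length := by omega
  rw [hsub, (List.prefix_iff_eq_take.mp (List.takeWhile_prefix p)).symm]

theorem extract_rack_id_eq (fname : String) :
    extract_rack_id_py fname = extract_rack_id_py_alt fname := by
  unfold extract_rack_id_py extract_rack_id_py_alt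
  simp only [PySem.Str.isIn_eq, PySem.Str.find_eq, PySem.Str.toList_lower, PySem.Str.toList_slice]
  by_cases h : PySem.Chars.isIn "rack".toList (PySem.Chars.lower fname.toList) = false
  · have hfind : PySem.Chars.find (PySem.Chars.lower fname.toList) "rack".toList = -1 :=
      (PySem.Chars.find_eq_neg_one_iff _ _).mpr ((PySem.Chars.isIn_eq_false_iff _ _).mp h)
    rw [if_pos h, if_pos hfind]
  · have hin : "rack".toList <:+: PySem.Chars.lower fname.toList := by
      cases hb : PySem.Chars.isIn "rack".toList (PySem.Chars.lower fname.toList)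
      · exact absurd hb h
      · exact (PySem.Chars.isIn_iff_infix _ _).mp hb
    have hfind : PySem.Chars.find (PySem.Chars.lower fname.toList) "rack".toList ≠ -1 :=
      (PySem.Chars.find_ne_neg_one_iff _ _).mpr hin
    rw [if_neg h, if_neg hfind, pvALoop_eq_takeWhile, List.nil_append,
      pvTake_sub_dropWhile, funext pvIsdigit_eq_mem]

-- ===== VERDICT (by name: the statement is the Claim_ definition above) =====
theorem extract_rack_id_py_spec : Claim_equal_extract_rack_id_py := by
  intro fname _
  unfold Spec_extract_rack_id_py
  exact extract_rack_id_eq fname
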